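-- pv_equiv track=rewrite | github.com/kevinszuchet/itc-fellows-part-time | pre_course/fixing_bugs_1.py | part4_get_str_mult_of_3
-- ===== SOURCE A (Python) =====
-- def part4_get_str_mult_of_3(num):
--     """
--     Return a string of a's and b's that answers whether a number from 0 till given num are multiples of 3
--     If a number is a multiple of 3, return 'a' for this number, and 'b' otherwise.
--     :param num: Number up to which to check (not inclusive)
--     :return: String of a's and b's, a's for all number from 0 till num that are multiples of 3, b otherwise
--     """
--     message = ""
--     for number in range(num):
--         # add 'a' if the number is a multiple of 3, otherwise add 'b'
--         if (number % 3) == 0: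
--             message = message + "a"
--         else:
--             message = message + "b"
--     return message
-- ===== SOURCE B (Python) =====
-- def part4_get_str_mult_of_3(num):
--     # period "abb" encodes i%3==0 -> 'a' else 'b'; repeat enough and cut to length
--     return ("abb" * (num // 3 + 1))[:num]
-- ===== Notes on version B (the rewrite author's own statement) =====
-- stated objective: faster
-- what changed: Replaces the per-index loop with per-element branching and string concatenation by repeating the fixed period 'abb' enough times and slicing to num characters; no Python-level loop remains.
import Mathlib
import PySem

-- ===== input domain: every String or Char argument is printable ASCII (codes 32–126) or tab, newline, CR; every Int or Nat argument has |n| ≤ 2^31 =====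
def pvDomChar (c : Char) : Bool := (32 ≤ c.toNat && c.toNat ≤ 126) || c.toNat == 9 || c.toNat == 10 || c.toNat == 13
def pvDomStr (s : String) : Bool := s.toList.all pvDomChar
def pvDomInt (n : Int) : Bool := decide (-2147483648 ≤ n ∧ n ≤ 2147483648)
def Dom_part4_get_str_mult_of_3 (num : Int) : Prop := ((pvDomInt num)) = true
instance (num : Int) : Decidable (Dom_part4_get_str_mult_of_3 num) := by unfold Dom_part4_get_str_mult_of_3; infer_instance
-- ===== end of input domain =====

-- B replaces A's per-index loop by repeating the fixed period "abb" num//3+1 times and slicing to num (idiomatic, no branch per element).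

-- ===== PORT A =====
-- literal port of A's loop: message starts empty, for number in range(num) append 'a' or 'b'
def part4_get_str_mult_of_3 (num : Int) : String :=
  String.ofList ((PySem.List.pyRange 0 num 1).foldl
    (fun message number => message ++ [if PySem.Int.mod number 3 = 0 then 'a' else 'b']) [])

-- ===== PORT B =====
-- literal port of Source B: ("abb" * (num // 3 + 1))[:num]
def part4_get_str_mult_of_3_alt (num : Int) : String :=
  String.ofList (PySem.List.slice (PySem.List.pyRepeat ['a', 'b', 'b'] (PySem.Int.floordiv num 3 + 1))
    none (some num))

-- ===== PRECONDITION & SPEC =====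
def Spec_part4_get_str_mult_of_3 (num : Int) (out : String) : Prop := out = part4_get_str_mult_of_3_alt num
instance (num : Int) (out : String) : Decidable (Spec_part4_get_str_mult_of_3 num out) := by unfold Spec_part4_get_str_mult_of_3; infer_instance

-- ===== CLAIM (what is proved, stated in full; the proofs are below) =====
def Claim_equal_part4_get_str_mult_of_3 : Prop := ∀ (num : Int), Dom_part4_get_str_mult_of_3 num → Spec_part4_get_str_mult_of_3 num (part4_get_str_mult_of_3 num)

-- ===== LEMMAS AND PROOFS =====

-- the character written by A at index k
def pvChar3 (k : Nat) : Char := if k % 3 = 0 then 'a' else 'b'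

-- taking n ≤ 3*r characters of r copies of "abb" yields exactly A's character sequence
theorem pvTake_replicate_abb (r : Nat) : ∀ n : Nat, n ≤ 3 * r →
    (List.replicate r ['a', 'b', 'b']).flatten.take n = (List.range n).map pvChar3 := by
  induction r with
  | zero => intro n hn; interval_cases n; simp
  | succ r ih =>
    intro n hn
    rw [List.replicate_succ, List.flatten_cons, List.take_append]
    by_cases h3 : n ≤ 3
    · interval_cases n <;> simp [pvChar3, List.range_succ]
    · obtain ⟨m, rfl⟩ : ∃ m, n = 3 + m := ⟨n - 3, by omega⟩
      have hlen : (['a', 'b', 'b'] : List Char).length = 3 := rfl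
      rw [hlen, List.take_of_length_le (by omega), show 3 + m - 3 = m by omega,
        ih m (by omega), List.range_add, List.map_append,
        show (List.range 3).map pvChar3 = ['a', 'b', 'b'] from rfl]
      congr 1
      simp only [List.map_map]
      apply List.map_congr_left
      intro k _
      simp [pvChar3]

theorem pvASem (num : Int) :
    part4_get_str_mult_of_3 num
      = String.ofList ((List.range num.toNat).map pvChar3) := by
  unfold part4_get_str_mult_of_3
  rw [PySem.List.foldl_append_singleton_eq_map, List.nil_append,
    PySem.List.pyRange_one, List.map_map]
  simp only [Int.sub_zero]
  congr 1
  apply List.map_congr_left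
  intro k _
  simp only [Function.comp_apply, zero_add, pvChar3]
  rw [show ((3 : Int)) = ((3 : Nat) : Int) by norm_num, PySem.Int.mod_natCast]
  by_cases h : k % 3 = 0
  · simp [h]
  · simp [h]; omega

theorem part4_equiv (num : Int) :
    part4_get_str_mult_of_3 num = part4_get_str_mult_of_3_alt num := by
  rw [pvASem]
  unfold part4_get_str_mult_of_3_alt
  by_cases hpos : 0 ≤ num
  · obtain ⟨n, rfl⟩ := Int.eq_ofNat_of_zero_le hpos
    rw [show ((3 : Int)) = ((3 : Nat) : Int) by norm_num, PySem.Int.floordiv_natCast,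
      show ((n / 3 : Nat) : Int) + 1 = ((n / 3 + 1 : Nat) : Int) by push_cast; ring]
    unfold PySem.List.pyRepeat
    rw [PySem.List.slice_to _ (Int.natCast_nonneg n)]
    simp only [Int.toNat_natCast]
    rw [pvTake_replicate_abb (n / 3 + 1) n (by omega)]
  · -- num < 0: A's range is empty and B's repeated string is empty
    rw [not_le] at hpos
    have h1 : num.toNat = 0 := by omega
    have h2 : PySem.Int.floordiv num 3 + 1 ≤ 0 := by
      have := PySem.Int.floordiv_mul_add_mod num 3
      have := PySem.Int.mod_nonneg num (b := 3) (by norm_num)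
      have := PySem.Int.mod_lt num (b := 3) (by norm_num)
      nlinarith [PySem.Int.floordiv num 3, PySem.Int.mod num 3]
    have h3 : (PySem.Int.floordiv num 3 + 1).toNat = 0 := by omega
    unfold PySem.List.pyRepeat
    rw [h1, h3]
    simp [PySem.List.slice]

-- ===== VERDICT (by name: the statement is the Claim_ definition above) =====
theorem part4_get_str_mult_of_3_spec : Claim_equal_part4_get_str_mult_of_3 := by
  intro num _
  unfold Spec_part4_get_str_mult_of_3
  exact part4_equiv num
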